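-- pv_equiv track=rewrite | github.com/KamilPrzybylski/Aplikacje_Webowe | 2024_04_08/zadanie04_08/main.py | wakacijne_slowo
-- ===== SOURCE A (Python) =====
-- def wakacijne_slowo(word):
--     czyzawierawakacje = False
--     wakacje = "wakacje"
--     i = 0
--     ile_razy_wakacje = 0
--     for letter in word:
--         if letter == wakacje[i]:
--             i += 1
--         else:
--             ile_razy_wakacje += 1
--         if i >= len(wakacje):
--             czyzawierawakacje = True
--             i = 0
--
--     if czyzawierawakacje:
--         return ile_razy_wakacje + i
--     return len(word)
-- ===== SOURCE B (Python) =====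
-- def wakacijne_slowo(word):
--     # Pattern-driven search: repeatedly locate each letter of "wakacje" with
--     # str.find and slice past it; count full rounds, answer = len - 7*rounds.
--     n = len(word)
--     rest = word
--     completions = 0
--     while True:
--         for ch in "wakacje":
--             k = rest.find(ch)
--             if k == -1:
--                 return n - 7 * completions
--             rest = rest[k + 1:]
--         completions += 1
-- ===== Notes on version B (the rewrite author's own statement) =====
-- stated objective: alternative
-- what changed: B drops A's per-character state machine (pattern index, mismatch accumulator, flag, leftover-index return) and instead repeatedly locates each pattern letter with str.find, slicing past it; it counts completed rounds and returns len(word) - 7*rounds, which provably equals A's result in all cases (and is measurably faster since str.find scans at C speed).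
import Mathlib
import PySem

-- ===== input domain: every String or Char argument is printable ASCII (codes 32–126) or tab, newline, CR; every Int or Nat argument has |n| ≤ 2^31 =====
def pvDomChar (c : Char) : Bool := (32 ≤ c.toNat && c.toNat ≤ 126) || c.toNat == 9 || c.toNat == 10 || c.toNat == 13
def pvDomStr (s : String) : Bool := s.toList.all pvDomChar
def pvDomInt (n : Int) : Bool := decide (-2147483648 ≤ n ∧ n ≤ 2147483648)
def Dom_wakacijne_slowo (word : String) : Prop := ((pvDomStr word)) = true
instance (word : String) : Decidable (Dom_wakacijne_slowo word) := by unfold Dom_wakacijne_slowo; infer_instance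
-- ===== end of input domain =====

-- B replaces A's per-character scan (pattern index + mismatch accumulator + flag) by a
-- pattern-driven search: it repeatedly jumps to each letter of "wakacje" with str.find,
-- slices past it, counts completed rounds and returns len(word) - 7*rounds (alternative
-- decomposition, same linear cost).


-- the constant string "wakacje" as its character list
def pvWakacje : List Char := ['w', 'a', 'k', 'a', 'c', 'j', 'e']

-- ===== PORT A =====
-- loop body of A: state (czyzawierawakacje, i, ile_razy_wakacje)
-- (wakacje[i] is always in range in A — i is reset before reaching 7 — so getD's
-- default is never used; this is exact)
def pvStepA (st : Bool × Nat × Nat) (letter : Char) : Bool × Nat × Nat :=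
  let i' := if letter == pvWakacje.getD st.2.1 ' ' then st.2.1 + 1 else st.2.1
  let ile' := if letter == pvWakacje.getD st.2.1 ' ' then st.2.2 else st.2.2 + 1
  if 7 ≤ i' then (true, 0, ile') else (st.1, i', ile')

def wakacijne_slowo (word : String) : Int :=
  let s := word.toList.foldl pvStepA (false, 0, 0)
  if s.1 then (s.2.2 : Int) + (s.2.1 : Int) else PySem.Str.len word

-- ===== PORT B =====
-- rest.find(ch) for a single character ch; Python's -1 result is modelled as none
def pvFind? (t : List Char) (c : Char) : Option Nat :=
  match t with
  | [] => none
  | x :: xs => if x = c then some 0 else (pvFind? xs c).map (· + 1)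

-- the inner 'for ch in "wakacje"' loop: locate each pattern char, slice past it
-- (rest[k+1:] = drop (k+1)); none = the early 'return' (some char not found)
def pvRound (rest : List Char) (pat : List Char) : Option (List Char) :=
  match pat with
  | [] => some rest
  | c :: cs =>
    match pvFind? rest c with
    | none => none
    | some k => pvRound (rest.drop (k + 1)) cs

theorem pvFind?_lt {t : List Char} {c : Char} {k : Nat} (h : pvFind? t c = some k) :
    k < t.length := by
  induction t generalizing k with
  | nil => simp [pvFind?] at h
  | cons x xs ih =>
    by_cases hx : x = c
    · simp [pvFind?, hx] at h; subst h; simp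
    · simp [pvFind?, hx] at h
      obtain ⟨k', hk', rfl⟩ := h
      have := ih hk'; simp; omega

theorem pvRound_le : ∀ (pat t t' : List Char), pvRound t pat = some t' → t'.length ≤ t.length := by
  intro pat
  induction pat with
  | nil => intro t t' h; simp [pvRound] at h; simp [h]
  | cons c cs ih =>
    intro t t' h
    rw [show pvRound t (c :: cs)
        = (match pvFind? t c with
           | none => none
           | some k => pvRound (t.drop (k + 1)) cs) from rfl] at h
    cases hf : pvFind? t c with
    | none => rw [hf] at h; simp at h
    | some k =>
      rw [hf] at h
      have h1 := ih _ _ h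
      have h2 := pvFind?_lt hf
      simp at h1; omega

theorem pvRound_lt {t t' : List Char} (h : pvRound t pvWakacje = some t') :
    t'.length < t.length := by
  rw [show pvRound t pvWakacje
      = (match pvFind? t 'w' with
         | none => none
         | some k => pvRound (t.drop (k + 1)) ['a', 'k', 'a', 'c', 'j', 'e']) from rfl] at h
  cases hf : pvFind? t 'w' with
  | none => rw [hf] at h; simp at h
  | some k =>
    rw [hf] at h
    have h1 := pvRound_le _ _ _ h
    have h2 := pvFind?_lt hf
    simp at h1; omega

-- the 'while True' loop: each completed round strictly shrinks rest
def pvLoop (n : Int) (rest : List Char) (completions : Nat) : Int :=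
  match h : pvRound rest pvWakacje with
  | none => n - 7 * (completions : Int)
  | some rest' => pvLoop n rest' (completions + 1)
termination_by rest.length
decreasing_by exact pvRound_lt h

def wakacijne_slowo_alt (word : String) : Int :=
  pvLoop (PySem.Str.len word) word.toList 0

-- ===== PRECONDITION & SPEC =====
def Spec_wakacijne_slowo (word : String) (out : Int) : Prop := out = wakacijne_slowo_alt word
instance (word : String) (out : Int) : Decidable (Spec_wakacijne_slowo word out) := by unfold Spec_wakacijne_slowo; infer_instance

-- ===== CLAIM (what is proved, stated in full; the proofs are below) =====
def Claim_equal_wakacijne_slowo : Prop := ∀ (word : String), Dom_wakacijne_slowo word → Spec_wakacijne_slowo word (wakacijne_slowo word)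

-- ===== LEMMAS AND PROOFS =====

-- proof-side per-character greedy scan: state (pattern index, completion count)
def pvStepB (st : Nat × Nat) (letter : Char) : Nat × Nat :=
  if letter == pvWakacje.getD st.1 ' ' then
    if st.1 + 1 == 7 then (0, st.2 + 1) else (st.1 + 1, st.2)
  else st

-- proof-side scan on the remaining-pattern representation
def scanP (t : List Char) (rem : List Char) (c : Nat) : Nat :=
  match t with
  | [] => c
  | x :: xs =>
    match rem with
    | [] => c
    | r :: rs =>
      if x = r then (if rs = [] then scanP xs pvWakacje (c + 1) else scanP xs rs c)
      else scanP xs (r :: rs) c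

theorem wak_drop (j : Nat) (hj : j < 7) :
    pvWakacje.drop j = pvWakacje.getD j ' ' :: pvWakacje.drop (j + 1) := by
  interval_cases j <;> rfl

-- A's fold relates to pvStepB (invariant from the A-side analysis)
theorem pv_loop_inv (l : List Char) : ∀ (czy : Bool) (i ile c : Nat),
    i < 7 → czy = decide (0 < c) →
    (l.foldl pvStepA (czy, i, ile)).2.1 = (l.foldl pvStepB (i, c)).1 ∧
    (l.foldl pvStepA (czy, i, ile)).2.1 < 7 ∧
    (l.foldl pvStepA (czy, i, ile)).1 = decide (0 < (l.foldl pvStepB (i, c)).2) ∧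
    (l.foldl pvStepA (czy, i, ile)).2.2 + (l.foldl pvStepA (czy, i, ile)).2.1
      + 7 * (l.foldl pvStepB (i, c)).2 = ile + i + 7 * c + l.length := by
  induction l with
  | nil => intro czy i ile c hi hc; simp [hi, hc]
  | cons x l ih =>
    intro czy i ile c hi hc
    by_cases hm : x = pvWakacje.getD i ' '
    · by_cases h7 : i + 1 = 7
      · have hA : pvStepA (czy, i, ile) x = (true, 0, ile) := by
          simp only [pvStepA, beq_iff_eq, if_pos hm]
          rw [if_pos (by omega)]
        have hB : pvStepB (i, c) x = (0, c + 1) := by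
          simp only [pvStepB, beq_iff_eq, if_pos hm]
          rw [if_pos (by simpa using h7)]
        simp only [List.foldl_cons, hA, hB]
        have := ih true 0 ile (c + 1) (by omega) (by simp)
        refine ⟨this.1, this.2.1, this.2.2.1, by have h := this.2.2.2; simp at h ⊢; omega⟩
      · have hA : pvStepA (czy, i, ile) x = (czy, i + 1, ile) := by
          simp only [pvStepA, beq_iff_eq, if_pos hm]
          rw [if_neg (by omega)]
        have hB : pvStepB (i, c) x = (i + 1, c) := by
          simp only [pvStepB, beq_iff_eq, if_pos hm]
          rw [if_neg (by simpa using h7)]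
        simp only [List.foldl_cons, hA, hB]
        have := ih czy (i + 1) ile c (by omega) hc
        refine ⟨this.1, this.2.1, this.2.2.1, by have h := this.2.2.2; simp at h ⊢; omega⟩
    · have hA : pvStepA (czy, i, ile) x = (czy, i, ile + 1) := by
        simp only [pvStepA, beq_iff_eq, if_neg hm]
        rw [if_neg (by omega)]
      have hB : pvStepB (i, c) x = (i, c) := by
        simp only [pvStepB, beq_iff_eq, if_neg hm]
      simp only [List.foldl_cons, hA, hB]
      have := ih czy i (ile + 1) c hi hc
      refine ⟨this.1, this.2.1, this.2.2.1, by have h := this.2.2.2; simp at h ⊢; omega⟩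

-- index-based scan = remaining-pattern scan
theorem foldlB_eq_scanP (t : List Char) : ∀ (j c : Nat), j < 7 →
    (t.foldl pvStepB (j, c)).2 = scanP t (pvWakacje.drop j) c := by
  induction t with
  | nil => intro j c hj; simp [scanP]
  | cons x xs ih =>
    intro j c hj
    rw [wak_drop j hj]
    by_cases hm : x = pvWakacje.getD j ' '
    · by_cases h7 : j + 1 = 7
      · have hj6 : j = 6 := by omega
        subst hj6
        have hB : pvStepB (6, c) x = (0, c + 1) := by
          simp only [pvStepB, beq_iff_eq, if_pos hm]; rfl
        rw [List.foldl_cons, hB, ih 0 (c + 1) (by omega)]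
        simp only [scanP, if_pos hm]
        rw [if_pos (by rfl), List.drop_zero]
      · have hB : pvStepB (j, c) x = (j + 1, c) := by
          simp only [pvStepB, beq_iff_eq, if_pos hm]
          rw [if_neg (by simpa using h7)]
        rw [List.foldl_cons, hB, ih (j + 1) c (by omega)]
        have hrs : pvWakacje.drop (j + 1) ≠ [] := by
          rw [wak_drop (j + 1) (by omega)]; simp
        simp only [scanP, if_pos hm, if_neg hrs]
    · have hB : pvStepB (j, c) x = (j, c) := by
        simp only [pvStepB, beq_iff_eq, if_neg hm]
      rw [List.foldl_cons, hB, ih j c hj]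
      simp only [scanP, if_neg hm]
      rw [← wak_drop j hj]

theorem scanP_no_match (r : Char) (rs : List Char) :
    ∀ (t : List Char) (c : Nat), pvFind? t r = none → scanP t (r :: rs) c = c := by
  intro t
  induction t with
  | nil => intro c _; simp [scanP]
  | cons x xs ih =>
    intro c h
    by_cases hx : x = r
    · simp [pvFind?, hx] at h
    · simp [pvFind?, hx] at h
      simp [scanP, hx, ih c h]

theorem scanP_skip (r : Char) (rs : List Char) :
    ∀ (t : List Char) (k c : Nat), pvFind? t r = some k →
      scanP t (r :: rs) c =
        (if rs = [] then scanP (t.drop (k + 1)) pvWakacje (c + 1)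
         else scanP (t.drop (k + 1)) rs c) := by
  intro t
  induction t with
  | nil => intro k c h; simp [pvFind?] at h
  | cons x xs ih =>
    intro k c h
    by_cases hx : x = r
    · simp [pvFind?, hx] at h
      subst h
      simp [scanP, hx]
    · simp [pvFind?, hx] at h
      obtain ⟨k', hk', rfl⟩ := h
      simp only [scanP, if_neg hx]
      rw [ih k' c hk']
      simp

theorem scanP_round : ∀ (rem : List Char), rem ≠ [] → ∀ (t : List Char) (c : Nat),
    scanP t rem c =
      (match pvRound t rem with
       | none => c
       | some t' => scanP t' pvWakacje (c + 1)) := by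
  intro rem
  induction rem with
  | nil => intro h; exact absurd rfl h
  | cons r rs ih =>
    intro _ t c
    rw [show pvRound t (r :: rs)
        = (match pvFind? t r with
           | none => none
           | some k => pvRound (t.drop (k + 1)) rs) from rfl]
    cases hf : pvFind? t r with
    | none => exact scanP_no_match r rs t c hf
    | some k =>
      rw [scanP_skip r rs t k c hf]
      by_cases hrs : rs = []
      · subst hrs; simp [pvRound]
      · rw [if_neg hrs, ih hrs (t.drop (k + 1)) c]

theorem pvLoop_eq (n : Int) : ∀ (t : List Char) (c : Nat),
    pvLoop n t c = n - 7 * (scanP t pvWakacje c : Int) := by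
  intro t
  induction ht : t.length using Nat.strong_induction_on generalizing t with
  | _ m ih =>
    intro c
    rw [pvLoop, scanP_round pvWakacje (by simp [pvWakacje]) t c]
    split
    · next heq => rw [heq]
    · next t' hr =>
      rw [hr]
      have hlt : t'.length < t.length := pvRound_lt hr
      rw [ih t'.length (by omega) t' rfl (c + 1)]

-- ===== VERDICT (by name: the statement is the Claim_ definition above) =====
theorem wakacijne_slowo_spec : Claim_equal_wakacijne_slowo := by
  intro word _
  unfold Spec_wakacijne_slowo wakacijne_slowo wakacijne_slowo_alt
  rw [pvLoop_eq]
  have hb := foldlB_eq_scanP word.toList 0 0 (by omega)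
  simp only [List.drop_zero] at hb
  rw [← hb]
  obtain ⟨h1, h2, h3, h4⟩ := pv_loop_inv word.toList false 0 0 0 (by omega) (by simp)
  simp only [Nat.add_zero, Nat.mul_zero] at h4
  rw [PySem.Str.len_eq]
  by_cases hczy : (word.toList.foldl pvStepA (false, 0, 0)).1 = true
  · simp only [hczy, if_pos]
    have hn : word.toList.length = word.length := String.length_toList
    omega
  · simp only [Bool.not_eq_true] at hczy
    simp only [hczy, Bool.false_eq_true, if_false]
    have hc0 : (word.toList.foldl pvStepB (0, 0)).2 = 0 := by
      rw [hczy] at h3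
      by_contra h
      simp [Nat.pos_of_ne_zero h] at h3
    rw [hc0]
    simp
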